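-- pv_equiv track=rewrite | github.com/AGProjects/blink-qt | blink/contacts.py | range_iterator
-- ===== SOURCE A (Python) =====
-- def range_iterator(indexes):
--     """Return contiguous ranges from indexes"""
--     start = last = None
--     for index in sorted(indexes):
--         if start is None:
--             start = index
--         elif index - last > 1:
--             yield (start, last)
--             start = index
--         last = index
--     else:
--         if indexes:
--             yield (start, last)
-- ===== SOURCE B (Python) =====
-- def range_iterator(indexes):
--     """Return contiguous ranges from indexes"""
--     s = set(indexes)
--     starts = sorted(x for x in s if x - 1 not in s)
--     ends = sorted(x for x in s if x + 1 not in s)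
--     return list(zip(starts, ends))
-- ===== Notes on version B (the rewrite author's own statement) =====
-- stated objective: alternative
-- what changed: Replaces A's sorted-scan state machine (start/last with emit-on-gap) by boundary detection: dedup into a set, the range starts are the members x with x-1 not in the set, the ends those with x+1 not in the set, sorted and zipped pairwise.
import Mathlib
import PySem

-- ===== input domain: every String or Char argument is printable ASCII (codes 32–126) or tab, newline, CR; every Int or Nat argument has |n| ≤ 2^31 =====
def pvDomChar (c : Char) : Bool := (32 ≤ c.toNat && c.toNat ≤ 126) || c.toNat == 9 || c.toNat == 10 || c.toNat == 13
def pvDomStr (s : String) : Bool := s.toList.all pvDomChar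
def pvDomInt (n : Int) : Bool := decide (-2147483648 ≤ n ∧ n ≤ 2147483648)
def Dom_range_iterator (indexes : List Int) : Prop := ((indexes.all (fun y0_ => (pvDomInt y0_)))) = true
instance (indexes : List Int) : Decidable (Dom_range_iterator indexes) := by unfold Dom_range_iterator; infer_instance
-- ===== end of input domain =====

-- B replaces A's running start/last emit-on-gap scan with set-membership boundary detection
-- (starts = x with x-1 absent, ends = x with x+1 absent, zipped); alternative algorithm, same cost.
-- A is a generator; the equivalence is about the list of yielded pairs.

-- ===== PORT A =====
-- one loop iteration of A: state is (start, last, yielded-so-far)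
def pvAStep (st : Option Int × Option Int × List (Int × Int)) (index : Int) :
    Option Int × Option Int × List (Int × Int) :=
  match st with
  | (start, last, out) =>
    match start with
    | none => (some index, some index, out)
    | some s =>
      match last with
      | some l =>
          if index - l > 1 then (some index, some index, out ++ [(s, l)])
          else (some s, some index, out)
      | none => (some s, some index, out)  -- unreachable: last is set whenever start is

def range_iterator (indexes : List Int) : List (Int × Int) :=
  let r := (PySem.List.sorted indexes (fun x => x) false).foldl pvAStep (none, none, [])
  if indexes.isEmpty then r.2.2
  else r.2.2 ++ [(r.1.getD 0, r.2.1.getD 0)]  -- getD 0 unreachable: start/last are `some` when indexes ≠ []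

-- ===== PORT B =====
def range_iterator_alt (indexes : List Int) : List (Int × Int) :=
  let s := PySem.Set.ofList indexes
  let starts := PySem.List.sorted (s.filter (fun x => !(PySem.Set.contains s (x - 1)))) (fun x => x) false
  let ends := PySem.List.sorted (s.filter (fun x => !(PySem.Set.contains s (x + 1)))) (fun x => x) false
  starts.zip ends

-- ===== PRECONDITION & SPEC =====
def Spec_range_iterator (indexes : List Int) (out : List (Int × Int)) : Prop := out = range_iterator_alt indexes
instance (indexes : List Int) (out : List (Int × Int)) : Decidable (Spec_range_iterator indexes out) := by unfold Spec_range_iterator; infer_instance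

-- ===== CLAIM (what is proved, stated in full; the proofs are below) =====
def Claim_equal_range_iterator : Prop := ∀ (indexes : List Int), Dom_range_iterator indexes → Spec_range_iterator indexes (range_iterator indexes)

-- ===== LEMMAS AND PROOFS =====

-- A's loop on a (start, last) = (a, b) state: emitted ranges and the final (start, last).
def pvLoop : Int → Int → List Int → List (Int × Int) × (Int × Int)
  | a, b, [] => ([], (a, b))
  | a, b, x :: xs =>
      if x - b > 1 then
        let p := pvLoop x x xs; ((a, b) :: p.1, p.2)
      else pvLoop a x xs

-- the strictly increasing elements that open a run / close a run, by adjacent comparison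
def pvSgo : Int → List Int → List Int
  | _, [] => []
  | p, y :: ys => if y - p > 1 then y :: pvSgo y ys else pvSgo y ys

def pvEgo : Int → List Int → List Int
  | p, [] => [p]
  | p, y :: ys => if y - p > 1 then p :: pvEgo y ys else pvEgo y ys

-- sorted dedup of a (≤)-sorted tail after head b
def pvSdd : Int → List Int → List Int
  | _, [] => []
  | b, x :: xs => if x = b then pvSdd b xs else x :: pvSdd x xs

theorem pvFoldl_eq_pvLoop (xs : List Int) (a b : Int) (acc : List (Int × Int)) :
    xs.foldl pvAStep (some a, some b, acc) =
      (some (pvLoop a b xs).2.1, some (pvLoop a b xs).2.2, acc ++ (pvLoop a b xs).1) := by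
  induction xs generalizing a b acc with
  | nil => simp [pvLoop]
  | cons x xs ih =>
      by_cases h : x - b > 1
      · simp [pvLoop, pvAStep, h, ih]
      · simp [pvLoop, pvAStep, h, ih]

theorem pvZip_eq_pvLoop (xs : List Int) (a b : Int) :
    (a :: pvSgo b xs).zip (pvEgo b xs) = (pvLoop a b xs).1 ++ [(pvLoop a b xs).2] := by
  induction xs generalizing a b with
  | nil => simp [pvSgo, pvEgo, pvLoop]
  | cons y ys ih =>
      by_cases h : y - b > 1
      · simp [pvSgo, pvEgo, pvLoop, h, List.zip]
        simpa [List.zip] using ih y y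
      · simpa [pvSgo, pvEgo, pvLoop, h] using ih a y

theorem pvSdd_pairwise {b : Int} {xs : List Int} (h : (b :: xs).Pairwise (· ≤ ·)) :
    (b :: pvSdd b xs).Pairwise (· < ·) := by
  induction xs generalizing b with
  | nil => simp [pvSdd]
  | cons x xs ih =>
      rcases List.pairwise_cons.1 h with ⟨hble, htail⟩
      by_cases hx : x = b
      · subst hx
        rw [show pvSdd x (x :: xs) = pvSdd x xs from by simp [pvSdd]]
        exact ih htail
      · have hbx : b < x := lt_of_le_of_ne (hble x (by simp)) (Ne.symm hx)
        have hx' : (x :: pvSdd x xs).Pairwise (· < ·) := ih htail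
        rw [show pvSdd b (x :: xs) = x :: pvSdd x xs from by simp [pvSdd, hx]]
        refine List.pairwise_cons.2 ⟨?_, hx'⟩
        intro z hz
        rcases List.mem_cons.1 hz with hz | hz
        · simpa [hz] using hbx
        · exact lt_trans hbx (List.rel_of_pairwise_cons hx' hz)

theorem pvMem_pvSdd_iff (z : Int) (xs : List Int) : ∀ b : Int,
    z ∈ b :: pvSdd b xs ↔ z ∈ b :: xs := by
  induction xs with
  | nil => intro b; rfl
  | cons x xs ih =>
      intro b
      by_cases hx : x = b
      · subst hx
        rw [show pvSdd x (x :: xs) = pvSdd x xs from by simp [pvSdd], ih x]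
        simp only [List.mem_cons]
        tauto
      · rw [show pvSdd b (x :: xs) = x :: pvSdd x xs from by simp [pvSdd, hx]]
        constructor
        · intro h
          rcases List.mem_cons.1 h with h | h
          · simp [h]
          · have hz : z ∈ x :: xs := (ih x).1 h
            simp only [List.mem_cons] at hz ⊢
            tauto
        · intro h
          rcases List.mem_cons.1 h with h | h
          · simp [h]
          · have hz : z ∈ x :: pvSdd x xs := (ih x).2 h
            simp only [List.mem_cons] at hz ⊢
            tauto

-- on a (≤)-sorted tail, duplicates are no-ops for A's loop
theorem pvLoop_pvSdd (xs : List Int) (a b : Int) (h : (b :: xs).Pairwise (· ≤ ·)) :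
    pvLoop a b xs = pvLoop a b (pvSdd b xs) := by
  induction xs generalizing a b with
  | nil => rfl
  | cons x xs ih =>
      rcases List.pairwise_cons.1 h with ⟨hble, htail⟩
      have hbx : b ≤ x := hble x (by simp)
      by_cases hx : x = b
      · subst hx
        have hgt : ¬ (x - x > 1) := by omega
        rw [show pvSdd x (x :: xs) = pvSdd x xs from by simp [pvSdd]]
        simp only [pvLoop, if_neg hgt]
        exact ih a x htail
      · rw [show pvSdd b (x :: xs) = x :: pvSdd x xs from by simp [pvSdd, hx]]
        simp only [pvLoop]
        by_cases hg : x - b > 1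
        · simp only [if_pos hg]
          rw [ih x x htail]
        · simp only [if_neg hg]
          rw [ih a x htail]

-- filter by "z-1 not a member" over a strictly increasing tail = adjacent-gap starts
theorem pvFilter_starts (xs : List Int) (p : Int) (h : (p :: xs).Pairwise (· < ·)) :
    xs.filter (fun z => !decide (z - 1 ∈ p :: xs)) = pvSgo p xs := by
  induction xs generalizing p with
  | nil => rfl
  | cons y ys ih =>
      rcases List.pairwise_cons.1 h with ⟨hlt, htail⟩
      have hpy : p < y := hlt y (by simp)
      have hys : ∀ z ∈ ys, y < z := fun z hz => List.rel_of_pairwise_cons htail hz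
      have hcongr : ∀ z ∈ ys,
          (fun z => !decide (z - 1 ∈ p :: y :: ys)) z = (fun z => !decide (z - 1 ∈ y :: ys)) z := by
        intro z hz
        have : y < z := hys z hz
        simp only [List.mem_cons]
        have : ¬ (z - 1 = p) := by omega
        simp [this]
      have hhead : (!decide (y - 1 ∈ p :: y :: ys)) = decide (y - p > 1) := by
        have h1 : ¬ (y - 1 = y) := by omega
        have h2 : y - 1 ∉ ys := by
          intro hm; have := hys _ hm; omega
        by_cases hc : y - 1 = p
        · have : ¬ (y - p > 1) := by omega
          simp [hc, this]
        · have : y - p > 1 := by omega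
          simp [List.mem_cons, hc, h1, h2, this]
      rw [List.filter_cons, List.filter_congr hcongr, ih y htail, hhead]
      by_cases hg : y - p > 1
      · simp [pvSgo, hg]
      · simp [pvSgo, hg]

-- filter by "z+1 not a member" over a strictly increasing list = adjacent-gap ends
theorem pvFilter_ends (xs : List Int) (p : Int) (h : (p :: xs).Pairwise (· < ·)) :
    (p :: xs).filter (fun z => !decide (z + 1 ∈ p :: xs)) = pvEgo p xs := by
  induction xs generalizing p with
  | nil => simp [pvEgo]
  | cons y ys ih =>
      rcases List.pairwise_cons.1 h with ⟨hlt, htail⟩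
      have hpy : p < y := hlt y (by simp)
      have hys : ∀ z ∈ ys, y < z := fun z hz => List.rel_of_pairwise_cons htail hz
      have hhead : (!decide (p + 1 ∈ p :: y :: ys)) = decide (y - p > 1) := by
        have h1 : ¬ (p + 1 = p) := by omega
        have h2 : p + 1 ∉ ys := by
          intro hm; have := hys _ hm; omega
        by_cases hc : p + 1 = y
        · have : ¬ (y - p > 1) := by omega
          simp [hc, this]
        · have : y - p > 1 := by omega
          simp [List.mem_cons, hc, h1, h2, this]
      have hcongr : ∀ z ∈ y :: ys,
          (fun z => !decide (z + 1 ∈ p :: y :: ys)) z = (fun z => !decide (z + 1 ∈ y :: ys)) z := by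
        intro z hz
        have hyz : y ≤ z := by
          rcases List.mem_cons.1 hz with h | h
          · omega
          · exact le_of_lt (hys z h)
        simp only [List.mem_cons]
        have : ¬ (z + 1 = p) := by omega
        simp [this]
      rw [List.filter_cons, List.filter_congr hcongr, ih y htail, hhead]
      by_cases hg : y - p > 1
      · simp [pvEgo, hg]
      · simp [pvEgo, hg]

-- B's sorted-filtered-set = filter over the sorted dedup list (any Boolean predicate)
theorem pvSorted_filter (indexes : List Int) (q : Int → Bool) :
    PySem.List.sorted ((PySem.Set.ofList indexes).filter q) (fun x => x) false =
      (PySem.List.sorted (PySem.Set.ofList indexes) (fun x => x) false).filter q := by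
  apply PySem.List.sorted_eq_of_perm_of_pairwise_lt
  · exact (PySem.List.sorted_perm _ _ _).filter q
  · exact (PySem.List.sorted_ofList_pairwise_lt indexes).sublist List.filter_sublist

theorem range_iterator_eq (indexes : List Int) :
    range_iterator indexes = range_iterator_alt indexes := by
  rcases hnil : indexes with _ | ⟨i0, irest⟩
  · rfl
  -- notation
  rw [← hnil]
  have hne : indexes ≠ [] := by simp [hnil]
  set s' : List Int := PySem.List.sorted indexes (fun x => x) false with hs'
  rcases hs : s' with _ | ⟨x, rest⟩
  · exact absurd ((PySem.List.sorted_eq_nil_iff _ _ _).1 (hs' ▸ hs)) hne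
  have hsle : (x :: rest).Pairwise (· ≤ ·) := by
    have := PySem.List.sorted_pairwise indexes (fun x => x)
    rw [← hs', hs] at this
    exact this
  -- the sorted dedup list
  set u : List Int := PySem.List.sorted (PySem.Set.ofList indexes) (fun x => x) false with hu
  have hult : u.Pairwise (· < ·) := by rw [hu]; exact PySem.List.sorted_ofList_pairwise_lt indexes
  -- u is exactly x :: pvSdd x rest
  have hu_eq : u = x :: pvSdd x rest := by
    rw [hu]
    apply PySem.List.sorted_eq_of_perm_of_pairwise_lt
    · have hn1 : (x :: pvSdd x rest).Nodup :=
        (pvSdd_pairwise hsle).imp (fun h => ne_of_lt h)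
      have hn2 : (PySem.Set.ofList indexes).Nodup := PySem.Set.nodup_ofList indexes
      rw [List.perm_ext_iff_of_nodup hn1 hn2]
      intro z
      rw [pvMem_pvSdd_iff, PySem.Set.mem_ofList]
      have h3 : z ∈ s' ↔ z ∈ indexes := PySem.List.mem_sorted _ _ _ _
      rw [hs] at h3
      exact h3
    · exact pvSdd_pairwise hsle
  have hult' : (x :: pvSdd x rest).Pairwise (· < ·) := hu_eq ▸ hult
  -- A's side
  have hA : range_iterator indexes =
      (pvLoop x x rest).1 ++ [((pvLoop x x rest).2.1, (pvLoop x x rest).2.2)] := by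
    unfold range_iterator
    rw [← hs', hs]
    have hstep : pvAStep (none, none, []) x = (some x, some x, []) := rfl
    simp only [List.foldl_cons, hstep, pvFoldl_eq_pvLoop, List.nil_append]
    simp [hnil]
  -- B's side
  have hcont : ∀ d : Int, PySem.Set.contains (PySem.Set.ofList indexes) d = decide (d ∈ u) := by
    intro d
    have h1 : PySem.Set.contains (PySem.Set.ofList indexes) d = true ↔ d ∈ PySem.Set.ofList indexes :=
      PySem.Set.contains_iff _ _
    have h2 : d ∈ u ↔ d ∈ PySem.Set.ofList indexes := PySem.List.mem_sorted _ _ _ _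
    rw [Bool.eq_iff_iff, h1, decide_eq_true_iff]
    exact h2.symm
  have hB : range_iterator_alt indexes =
      ((x :: pvSgo x (pvSdd x rest)).zip (pvEgo x (pvSdd x rest))) := by
    unfold range_iterator_alt
    simp only [pvSorted_filter, ← hu]
    have e1 : u.filter (fun z => !(PySem.Set.contains (PySem.Set.ofList indexes) (z - 1))) =
        u.filter (fun z => !decide (z - 1 ∈ u)) := by
      apply List.filter_congr; intro z _; rw [hcont]
    have e2 : u.filter (fun z => !(PySem.Set.contains (PySem.Set.ofList indexes) (z + 1))) =
        u.filter (fun z => !decide (z + 1 ∈ u)) := by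
      apply List.filter_congr; intro z _; rw [hcont]
    rw [e1, e2, hu_eq]
    have hstart : (x :: pvSdd x rest).filter (fun z => !decide (z - 1 ∈ x :: pvSdd x rest)) =
        x :: pvSgo x (pvSdd x rest) := by
      rw [List.filter_cons]
      have hx1 : (x - 1) ∉ x :: pvSdd x rest := by
        intro hm
        rcases List.mem_cons.1 hm with h | h
        · omega
        · have := List.rel_of_pairwise_cons hult' h; omega
      rw [pvFilter_starts _ _ hult']
      simp [hx1]
    rw [hstart, pvFilter_ends _ _ hult']
  rw [hA, hB, pvZip_eq_pvLoop, ← pvLoop_pvSdd rest x x hsle]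

-- ===== VERDICT (by name: the statement is the Claim_ definition above) =====
theorem range_iterator_spec : Claim_equal_range_iterator := by
  intro indexes _
  unfold Spec_range_iterator
  exact range_iterator_eq indexes
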